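-- pv_equiv track=rewrite | github.com/maria-campo-martins/cs-161 | hw2.py | MULT_DFS
-- ===== SOURCE A (Python) =====
-- def FINAL_STATE(S):
--     return all(x is True for x in S)
--
-- def NEXT_STATE(S, A):
--     h, b, d, p = S
--     if A == 'h':
--         new_state = (not h, b, d, p)
--     elif A == 'b':
--         if h != b:
--             return []
--         new_state = (not h, not b, d, p)
--     elif A == 'd':
--         if h != d:
--             return []
--         new_state = (not h, b, not d, p)
--     elif A == 'p':
--         if h != p:
--             return []
--         new_state = (not h, b, d, not p)
--     else:
--         return []
--     # Safety check
--     nh, nb, nd, np = new_state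
--     if (nb == nd and nh != nb) or (nb == np and nh != nb):
--         return []
--     return [new_state]
--
-- def SUCC_FN(S):
--     actions = ['h', 'b', 'd', 'p']
--     next = []
--     for a in actions:
--         if NEXT_STATE(S, a):
--             next = next + NEXT_STATE(S, a)
--     return next
--
-- def ON_PATH(S, STATES):
--     return S in set(STATES)
--
-- def MULT_DFS(STATES, PATH):
--     if FINAL_STATE(PATH[-1]): #We've reached the goal state, return complete path
--         return PATH
--     if not STATES:
--         return []
--     else: #Keep searching
--         for state in STATES:
--             res = DFS_SOL(state, PATH[:])
--             if res:
--                 return res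
--         return []
--
-- def DFS_SOL(S, PATH):
--     if FINAL_STATE(S):
--         return PATH + [S]
--     elif ON_PATH(S, PATH):
--         return []
--     else:
--         PATH.append(S)
--         successors = SUCC_FN(S)
--         result = MULT_DFS(successors, PATH[:])
--         PATH.pop()
--         return result
-- ===== SOURCE B (Python) =====
-- def FINAL_STATE(S):
--     return all(x is True for x in S)
--
-- def NEXT_STATE(S, A):
--     h, b, d, p = S
--     if A == 'h':
--         new_state = (not h, b, d, p)
--     elif A == 'b':
--         if h != b:
--             return []
--         new_state = (not h, not b, d, p)
--     elif A == 'd':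
--         if h != d:
--             return []
--         new_state = (not h, b, not d, p)
--     elif A == 'p':
--         if h != p:
--             return []
--         new_state = (not h, b, d, not p)
--     else:
--         return []
--     nh, nb, nd, np = new_state
--     if (nb == nd and nh != nb) or (nb == np and nh != nb):
--         return []
--     return [new_state]
--
-- def SUCC_FN(S):
--     actions = ['h', 'b', 'd', 'p']
--     next = []
--     for a in actions:
--         if NEXT_STATE(S, a):
--             next = next + NEXT_STATE(S, a)
--     return next
--
-- def MULT_DFS(STATES, PATH):
--     # Iterative DFS with an explicit LIFO stack of (state, path) frames.
--     if FINAL_STATE(PATH[-1]):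
--         return PATH
--     stack = [(s, list(PATH)) for s in reversed(STATES)]
--     while stack:
--         state, path = stack.pop()
--         if FINAL_STATE(state):
--             return path + [state]
--         if state in path:
--             continue
--         newpath = path + [state]
--         for s in reversed(SUCC_FN(state)):
--             stack.append((s, newpath))
--     return []
-- ===== Notes on version B (the rewrite author's own statement) =====
-- stated objective: alternative
-- what changed: The mutually recursive MULT_DFS/DFS_SOL pair (with append/pop path mutation) is replaced by a single iterative DFS loop over an explicit LIFO stack of (state, path) frames, pushing successors in reverse so the visit order and returned path are identical.
import Mathlib
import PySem

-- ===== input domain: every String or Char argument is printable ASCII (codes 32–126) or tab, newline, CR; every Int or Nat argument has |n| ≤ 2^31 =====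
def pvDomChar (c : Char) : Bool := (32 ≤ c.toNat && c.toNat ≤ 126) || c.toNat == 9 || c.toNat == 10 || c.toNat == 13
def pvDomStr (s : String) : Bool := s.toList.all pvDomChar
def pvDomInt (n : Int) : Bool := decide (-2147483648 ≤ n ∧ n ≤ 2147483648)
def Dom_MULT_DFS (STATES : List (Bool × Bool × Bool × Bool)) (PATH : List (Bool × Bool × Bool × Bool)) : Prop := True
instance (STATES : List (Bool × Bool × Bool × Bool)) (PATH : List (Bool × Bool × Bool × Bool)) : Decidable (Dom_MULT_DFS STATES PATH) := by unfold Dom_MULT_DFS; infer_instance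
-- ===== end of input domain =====

-- B replaces the mutual recursion MULT_DFS/DFS_SOL with a single iterative DFS over an
-- explicit LIFO stack of (state, path) frames (alternative decomposition, same cost).


abbrev PyState := Bool × Bool × Bool × Bool

-- ===== PORT A =====
-- shared module helpers (identical in Source A and Source B)
def FINAL_STATE (S : PyState) : Bool :=
  S.1 && S.2.1 && S.2.2.1 && S.2.2.2

def NEXT_STATE (S : PyState) (A : Char) : List PyState :=
  let h := S.1; let b := S.2.1; let d := S.2.2.1; let p := S.2.2.2
  -- the trailing "safety check" of the Python code, applied to new_state
  let check : PyState → List PyState := fun ns =>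
    let nh := ns.1; let nb := ns.2.1; let nd := ns.2.2.1; let np := ns.2.2.2
    if (nb == nd && nh != nb) || (nb == np && nh != nb) then [] else [ns]
  if A = 'h' then check (!h, b, d, p)
  else if A = 'b' then (if h != b then [] else check (!h, !b, d, p))
  else if A = 'd' then (if h != d then [] else check (!h, b, !d, p))
  else if A = 'p' then (if h != p then [] else check (!h, b, d, !p))
  else []

def SUCC_FN (S : PyState) : List PyState :=
  (['h', 'b', 'd', 'p'].foldl
    (fun next a => if NEXT_STATE S a ≠ [] then next ++ NEXT_STATE S a else next) [])

def ON_PATH (S : PyState) (STATES : List PyState) : Bool :=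
  decide (S ∈ PySem.Set.ofList STATES)

-- termination measure: free slots in the 16-state space not yet on PATH
def pvK (PATH : List PyState) : Nat := 17 - PATH.toFinset.card

lemma pvK_card_le (PATH : List PyState) : PATH.toFinset.card ≤ 16 :=
  le_trans (Finset.card_le_univ _) (by decide)

lemma pvK_append (S : PyState) (PATH : List PyState) (h : S ∉ PATH) :
    pvK (PATH ++ [S]) = pvK PATH - 1 := by
  have hc := pvK_card_le PATH
  have : (PATH ++ [S]).toFinset = insert S PATH.toFinset := by
    simp [List.toFinset_append]
  rw [pvK, pvK, this, Finset.card_insert_of_notMem (by simpa using h)]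
  omega

lemma pvK_pos (PATH : List PyState) : 1 ≤ pvK PATH := by
  have := pvK_card_le PATH; simp only [pvK]; omega

lemma pvSucc_len_le (S : PyState) : (SUCC_FN S).length ≤ 4 := by
  revert S; decide

lemma pvSum_frames (l : List PyState) (P : List PyState) :
    ((l.map (fun s => (s, P))).map (fun f : PyState × List PyState => 5 ^ pvK f.2)).sum
      = l.length * 5 ^ pvK P := by
  induction l with
  | nil => simp
  | cons a t ih =>
    simp only [List.map_cons, List.sum_cons, List.length_cons]
    rw [ih, Nat.succ_mul, Nat.add_comm]

mutual
-- MULT_DFS: the top-level guard, then the for-loop over STATES (DFS_loop)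
def MULT_DFS (STATES : List PyState) (PATH : List PyState) : List PyState :=
  match PySem.List.pyGet? PATH (-1) with
  | none => []  -- Python raises IndexError here; excluded by Pre_MULT_DFS
  | some last =>
    if FINAL_STATE last then PATH
    else if STATES = [] then []
    else DFS_loop STATES PATH
termination_by 20 * pvK PATH + 7 + STATES.length

-- the "for state in STATES: res = DFS_SOL(state, PATH[:]); if res: return res" loop
def DFS_loop (STATES : List PyState) (PATH : List PyState) : List PyState :=
  match STATES with
  | [] => []
  | state :: rest =>
    let res := DFS_SOL state PATH
    if res ≠ [] then res else DFS_loop rest PATH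
termination_by 20 * pvK PATH + 1 + STATES.length

def DFS_SOL (S : PyState) (PATH : List PyState) : List PyState :=
  if FINAL_STATE S then PATH ++ [S]
  else if ON_PATH S PATH then []
  else MULT_DFS (SUCC_FN S) (PATH ++ [S])  -- append/pop on the local copy = PATH ++ [S]
termination_by 20 * pvK PATH
decreasing_by
  · have h1 : pvK (PATH ++ [S]) = pvK PATH - 1 := by
      apply pvK_append
      have : ¬ ON_PATH S PATH = true := by assumption
      simpa [ON_PATH, PySem.Set.mem_ofList] using this
    have h2 := pvK_pos PATH
    have h3 := pvSucc_len_le S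
    omega
end

-- ===== PORT B =====
-- Source B's while-loop over the explicit stack; the Lean list head is the Python stack top
-- (so Python's "reversed" pushes become plain map/append at the front).
def MULT_DFS_stack (stack : List (PyState × List PyState)) : List PyState :=
  match stack with
  | [] => []
  | (state, path) :: rest =>
    if FINAL_STATE state then path ++ [state]
    else if state ∈ path then MULT_DFS_stack rest
    else MULT_DFS_stack ((SUCC_FN state).map (fun s => (s, path ++ [state])) ++ rest)
termination_by (stack.map (fun f => 5 ^ pvK f.2)).sum
decreasing_by
  · have hpos : 0 < 5 ^ pvK path := Nat.pow_pos (by omega)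
    simp only [List.map_cons, List.sum_cons]
    omega
  · have h1 : pvK (path ++ [state]) = pvK path - 1 := pvK_append _ _ (by assumption)
    have h2 := pvK_pos path
    have h3 := pvSucc_len_le state
    simp only [List.map_cons, List.sum_cons, List.map_append, List.sum_append, pvSum_frames]
    have hc : 5 ^ pvK path = 5 * 5 ^ (pvK path - 1) := by
      conv_lhs => rw [show pvK path = (pvK path - 1) + 1 by omega]
      rw [pow_succ, Nat.mul_comm]
    have h4 : (SUCC_FN state).length * 5 ^ (pvK path - 1) ≤ 4 * 5 ^ (pvK path - 1) :=
      Nat.mul_le_mul_right _ h3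
    have hpos : 0 < 5 ^ (pvK path - 1) := Nat.pow_pos (by omega)
    rw [h1]
    omega

def MULT_DFS_alt (STATES : List PyState) (PATH : List PyState) : List PyState :=
  match PySem.List.pyGet? PATH (-1) with
  | none => []  -- Python raises IndexError here; excluded by Pre_MULT_DFS
  | some last =>
    if FINAL_STATE last then PATH
    else MULT_DFS_stack (STATES.map (fun s => (s, PATH)))

-- ===== PRECONDITION & SPEC =====
-- Pre_ excludes empty PATH, on which both Pythons raise IndexError at PATH[-1].
def Pre_MULT_DFS (STATES : List PyState) (PATH : List PyState) : Prop := PATH ≠ []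
instance (STATES : List (Bool × Bool × Bool × Bool)) (PATH : List (Bool × Bool × Bool × Bool)) : Decidable (Pre_MULT_DFS STATES PATH) := by unfold Pre_MULT_DFS; infer_instance
def pvWitness_MULT_DFS : (List (Bool × Bool × Bool × Bool)) × (List (Bool × Bool × Bool × Bool)) :=
  ([(false, false, false, false)], [(true, false, false, false)])

def Spec_MULT_DFS (STATES : List (Bool × Bool × Bool × Bool)) (PATH : List (Bool × Bool × Bool × Bool)) (out : List (Bool × Bool × Bool × Bool)) : Prop := out = MULT_DFS_alt STATES PATH
instance (STATES : List (Bool × Bool × Bool × Bool)) (PATH : List (Bool × Bool × Bool × Bool)) (out : List (Bool × Bool × Bool × Bool)) : Decidable (Spec_MULT_DFS STATES PATH out) := by unfold Spec_MULT_DFS; infer_instance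

-- ===== CLAIM (what is proved, stated in full; the proofs are below) =====
def Claim_equal_MULT_DFS : Prop := ∀ (STATES : List (Bool × Bool × Bool × Bool)) (PATH : List (Bool × Bool × Bool × Bool)), Dom_MULT_DFS STATES PATH → Pre_MULT_DFS STATES PATH → Spec_MULT_DFS STATES PATH (MULT_DFS STATES PATH)

-- ===== LEMMAS AND PROOFS =====

lemma pvGet_last (l : List PyState) (S : PyState) :
    PySem.List.pyGet? (l ++ [S]) (-1) = some S := by
  simp [PySem.List.pyGet?, PySem.List.pyIdx?]

-- one MULT_DFS step on a nonempty non-final path equals the STATES loop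
lemma pvMULT_step (STATES : List PyState) (l : List PyState) (S : PyState)
    (hf : ¬ FINAL_STATE S = true) :
    MULT_DFS STATES (l ++ [S]) = DFS_loop STATES (l ++ [S]) := by
  rw [MULT_DFS, pvGet_last]
  simp only [hf, if_false, Bool.false_eq_true]
  by_cases hS : STATES = []
  · subst hS; rw [DFS_loop]; simp
  · simp [hS]

-- the stack loop simulates DFS_SOL on its top frame and DFS_loop on a block of frames
lemma pvMain : ∀ (n : Nat) (PATH : List PyState), pvK PATH ≤ n →
    (∀ (S : PyState) (rest : List (PyState × List PyState)),
      MULT_DFS_stack ((S, PATH) :: rest) =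
        if DFS_SOL S PATH = [] then MULT_DFS_stack rest else DFS_SOL S PATH)
  ∧ (∀ (STATES : List PyState) (rest : List (PyState × List PyState)),
      MULT_DFS_stack (STATES.map (fun s => (s, PATH)) ++ rest) =
        if DFS_loop STATES PATH = [] then MULT_DFS_stack rest else DFS_loop STATES PATH) := by
  intro n
  induction n using Nat.strong_induction_on with
  | _ n IH =>
  intro PATH hn
  have hL1 : ∀ (S : PyState) (rest : List (PyState × List PyState)),
      MULT_DFS_stack ((S, PATH) :: rest) =
        if DFS_SOL S PATH = [] then MULT_DFS_stack rest else DFS_SOL S PATH := by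
    intro S rest
    rw [MULT_DFS_stack, DFS_SOL]
    by_cases hf : FINAL_STATE S = true
    · simp [hf]
    · by_cases hp : S ∈ PATH
      · simp [hf, hp, ON_PATH, PySem.Set.mem_ofList]
      · have hk : pvK (PATH ++ [S]) = pvK PATH - 1 := pvK_append _ _ hp
        have h2 := pvK_pos PATH
        have hrec := (IH (n - 1) (by omega) (PATH ++ [S]) (by omega)).2 (SUCC_FN S) rest
        simp only [hf, hp, ON_PATH, PySem.Set.mem_ofList,
          if_false, Bool.false_eq_true, decide_false]
        rw [hrec, pvMULT_step _ _ _ hf]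
  refine ⟨hL1, ?_⟩
  intro STATES
  induction STATES with
  | nil =>
    intro rest
    rw [DFS_loop]
    simp
  | cons s t ih =>
    intro rest
    rw [DFS_loop]
    simp only [List.map_cons, List.cons_append]
    rw [hL1 s (t.map (fun x => (x, PATH)) ++ rest)]
    by_cases h : DFS_SOL s PATH = []
    · simp only [h, if_true]
      rw [ih rest]
      simp
    · simp [h]

-- ===== VERDICT (by name: the statement is the Claim_ definition above) =====
theorem MULT_DFS_spec : Claim_equal_MULT_DFS := by
  intro STATES PATH _ hpre
  unfold Spec_MULT_DFS
  obtain ⟨l, S, rfl⟩ : ∃ l S, PATH = l ++ [S] :=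
    ⟨PATH.dropLast, PATH.getLast hpre, (List.dropLast_concat_getLast hpre).symm⟩
  rw [MULT_DFS, MULT_DFS_alt, pvGet_last]
  by_cases hf : FINAL_STATE S = true
  · simp [hf]
  · simp only [hf, if_false, Bool.false_eq_true]
    have hmain := (pvMain (pvK (l ++ [S])) (l ++ [S]) le_rfl).2 STATES []
    rw [List.append_nil] at hmain
    rw [hmain]
    by_cases hS : STATES = []
    · subst hS
      rw [DFS_loop]
      simp [MULT_DFS_stack]
    · simp only [hS, if_false]
      split_ifs with h
      · rw [h, MULT_DFS_stack]
      · rfl
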